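-- pv_equiv track=rewrite | github.com/demethan/Poker-Game-Organizer | app.py | table_sizes
-- ===== SOURCE A (Python) =====
-- def table_sizes(total_players: int, multiple_tables: bool = False) -> list:
--     if total_players <= 0:
--         return []
--     if not multiple_tables:
--         return [total_players]
--     if total_players <= 9:
--         return [total_players]
--     table_count = (total_players + 8) // 9
--     base = total_players // table_count
--     remainder = total_players % table_count
--     return [base + 1 if idx < remainder else base for idx in range(table_count)]
-- ===== SOURCE B (Python) =====
-- def table_sizes(total_players: int, multiple_tables: bool = False) -> list:
--     if total_players <= 0:
--         return []
--     if not multiple_tables or total_players <= 9: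
--         return [total_players]
--     # peel one table of ceil(n/t) seats at a time
--     sizes = []
--     n = total_players
--     t = (total_players + 8) // 9
--     while t > 1:
--         size = -(-n // t)
--         sizes.append(size)
--         n -= size
--         t -= 1
--     sizes.append(n)
--     return sizes
-- ===== Notes on version B (the rewrite author's own statement) =====
-- stated objective: alternative
-- what changed: Replaces the base/remainder closed-form comprehension with a peeling loop: while t tables remain, emit one table of ceil(n/t) seats and continue with the remaining players and t-1 tables.
import Mathlib
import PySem

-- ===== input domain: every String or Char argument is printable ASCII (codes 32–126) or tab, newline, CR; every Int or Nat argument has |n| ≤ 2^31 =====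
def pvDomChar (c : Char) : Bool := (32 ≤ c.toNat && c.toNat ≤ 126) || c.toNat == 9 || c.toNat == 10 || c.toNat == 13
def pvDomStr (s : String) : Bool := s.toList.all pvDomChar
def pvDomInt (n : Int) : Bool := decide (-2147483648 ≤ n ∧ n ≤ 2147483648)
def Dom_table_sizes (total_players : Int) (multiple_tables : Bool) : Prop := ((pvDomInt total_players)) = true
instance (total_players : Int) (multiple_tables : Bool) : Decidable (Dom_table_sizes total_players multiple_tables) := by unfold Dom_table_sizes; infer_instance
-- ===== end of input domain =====

-- B replaces the base/remainder comprehension with recursive peeling (one table of ceil(n/t) seats per step); alternative decomposition, not faster.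
-- ===== PORT A =====
def table_sizes (total_players : Int) (multiple_tables : Bool) : List Int :=
  if total_players ≤ 0 then []
  else if !multiple_tables then [total_players]
  else if total_players ≤ 9 then [total_players]
  else
    let table_count := PySem.Int.floordiv (total_players + 8) 9
    let base := PySem.Int.floordiv total_players table_count
    let remainder := PySem.Int.mod total_players table_count
    (PySem.List.pyRange 0 table_count 1).map (fun idx => if idx < remainder then base + 1 else base)

-- ===== PORT B =====
-- the peeling `while t > 1` loop, as structural recursion on t (positive at entry,
-- decremented by 1 each step); `size = -(-n // t)` is ceiling division via floordiv.
def pvDeal (n : Int) : Nat → List Int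
  | 0 => [n]
  | 1 => [n]
  | (t + 2) =>
      let size := -(PySem.Int.floordiv (-n) ((t : Int) + 2))
      size :: pvDeal (n - size) (t + 1)

def table_sizes_alt (total_players : Int) (multiple_tables : Bool) : List Int :=
  if total_players ≤ 0 then []
  else if !multiple_tables || total_players ≤ 9 then [total_players]
  else pvDeal total_players (PySem.Int.floordiv (total_players + 8) 9).toNat

-- ===== PRECONDITION & SPEC =====
def Spec_table_sizes (total_players : Int) (multiple_tables : Bool) (out : List Int) : Prop := out = table_sizes_alt total_players multiple_tables
instance (total_players : Int) (multiple_tables : Bool) (out : List Int) : Decidable (Spec_table_sizes total_players multiple_tables out) := by unfold Spec_table_sizes; infer_instance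

-- ===== CLAIM =====
def Claim_equal_table_sizes : Prop := ∀ (total_players : Int) (multiple_tables : Bool), Dom_table_sizes total_players multiple_tables → Spec_table_sizes total_players multiple_tables (table_sizes total_players multiple_tables)

-- ===== LEMMAS AND PROOFS =====

-- recursive peeling computes the quotient/remainder table
lemma deal_eq (t : Nat) (ht : 0 < t) : ∀ n : Nat,
    pvDeal (n : Int) t
      = (List.range t).map (fun i => ((n / t : Nat) : Int) + if i < n % t then 1 else 0) := by
  induction t with
  | zero => omega
  | succ k ih =>
    intro n
    match k, ih with
    | 0, _ => simp [pvDeal, Nat.mod_one, Nat.div_one]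
    | (k + 1), ih =>
      have hd := Nat.div_add_mod n (k + 2)
      have hm : n % (k + 2) < k + 2 := Nat.mod_lt _ (by omega)
      set q := n / (k + 2) with hq
      set r := n % (k + 2) with hr
      set s : Nat := (n + k + 1) / (k + 2) with hsdef
      have hd2 : (k + 2) * s + (n + k + 1) % (k + 2) = n + k + 1 := Nat.div_add_mod _ _
      have hm2 : (n + k + 1) % (k + 2) < k + 2 := Nat.mod_lt _ (by omega)
      -- `size = -(-n // t)` is the ceiling ⌈n/(k+2)⌉ = (n+k+1)/(k+2)
      have hsize : -(PySem.Int.floordiv (-(n : Int)) ((k : Int) + 2)) = ((s : Nat) : Int) := by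
        rw [PySem.Int.neg_floordiv_neg_eq_iff_of_pos (by omega)]
        have e1 : ((s : Int) - 1) * ((k : Int) + 2) = (((k + 2) * s : Nat) : Int) - ((k : Int) + 2) := by
          push_cast; ring
        have e2 : ((s : Int)) * ((k : Int) + 2) = (((k + 2) * s : Nat) : Int) := by
          push_cast; ring
        constructor <;> omega
      have hmulq : (k + 2) * (q + 1) = (k + 2) * q + (k + 2) := by ring
      have hs_val : s = q + if r = 0 then 0 else 1 := by
        rcases Nat.eq_zero_or_pos r with h | h
        · have he : n + k + 1 = (k + 2) * q + (k + 1) := by omega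
          rw [hsdef, he, Nat.mul_add_div (by omega), Nat.div_eq_of_lt (by omega), if_pos h]
        · have he : n + k + 1 = (k + 2) * (q + 1) + (r - 1) := by omega
          rw [hsdef, he, Nat.mul_add_div (by omega), Nat.div_eq_of_lt (by omega),
            if_neg (by omega)]
      have hstep : pvDeal (n : Int) (k + 2)
          = ((s : Nat) : Int) :: pvDeal ((n : Int) - ((s : Nat) : Int)) (k + 1) := by
        rw [pvDeal]
        simp only [hsize]
      have hqle : q ≤ (k + 2) * q := Nat.le_mul_of_pos_left q (by omega)
      have hsle : s ≤ n := by
        rw [hs_val]; split_ifs <;> omega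
      have hsub : (n : Int) - (s : Int) = ((n - s : Nat) : Int) := by omega
      set r' : Nat := r - 1 with hr'
      have hdec : n - s = r' + q * (k + 1) := by
        have hmul1 : q * (k + 1) + q = (k + 2) * q := by ring
        rw [hs_val]; split_ifs <;> omega
      have hq' : (n - s) / (k + 1) = q := by
        rw [hdec, Nat.add_mul_div_right _ _ (by omega), Nat.div_eq_of_lt (by omega)]
        omega
      have hm' : (n - s) % (k + 1) = r' := by
        rw [hdec, Nat.add_mul_mod_self_right, Nat.mod_eq_of_lt (by omega)]
      rw [hstep, hsub, ih (by omega) (n - s), hq', hm']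
      apply List.ext_getElem
      · simp
      · intro i hi hi'
        rcases Nat.eq_zero_or_pos i with hi0 | hip
        · subst hi0
          simp only [List.getElem_cons_zero, List.getElem_map, List.getElem_range]
          rw [hs_val]
          by_cases h : r = 0
          · simp [h]
          · rw [if_neg h, if_pos (by omega)]; push_cast; ring
        · obtain ⟨j, rfl⟩ : ∃ j, i = j + 1 := ⟨i - 1, by omega⟩
          simp only [List.getElem_cons_succ, List.getElem_map, List.getElem_range]
          split_ifs with h1 h2 h2 <;> first | rfl | omega

theorem table_sizes_spec : Claim_equal_table_sizes := by
  intro tp mt _hd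
  unfold Spec_table_sizes table_sizes table_sizes_alt
  by_cases h0 : tp ≤ 0
  · simp [h0]
  by_cases hm : mt
  case neg => simp [hm]
  by_cases h9 : tp ≤ 9
  · simp [h0, hm, h9]
  simp only [if_neg h0, hm, Bool.not_true, Bool.false_eq_true, if_false, Bool.false_or,
    decide_eq_true_eq, if_neg h9]
  obtain ⟨n, rfl⟩ : ∃ n : Nat, tp = (n : Int) := ⟨tp.toNat, by omega⟩
  have hn : 10 ≤ n := by exact_mod_cast (by omega : (10:Int) ≤ (n:Int))
  set t : Nat := (n + 8) / 9 with htdef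
  have ht : 0 < t := by
    have : 2 ≤ (n + 8) / 9 := Nat.le_div_iff_mul_le (by omega) |>.mpr (by omega)
    omega
  have htc : PySem.Int.floordiv ((n : Int) + 8) 9 = (t : Int) := by
    have h8 : ((n : Int) + 8) = ((n + 8 : Nat) : Int) := by push_cast; ring
    rw [h8]
    exact_mod_cast PySem.Int.floordiv_natCast (n + 8) 9
  rw [htc, Int.toNat_natCast, PySem.Int.floordiv_natCast n t, PySem.Int.mod_natCast n t,
    PySem.List.pyRange_zero_natCast, List.map_map, deal_eq t ht n]
  apply List.map_congr_left
  intro i _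
  simp only [Function.comp]
  by_cases hc : i < n % t
  · rw [if_pos (by exact_mod_cast hc), if_pos hc]
  · rw [if_neg (by exact_mod_cast hc), if_neg hc, add_zero]
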